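-- pv_equiv track=rewrite | github.com/lhackel-tub/ConfigILM | configilm/Fusion/AbstractFusion.py | get_sizes_list
-- ===== SOURCE A (Python) =====
-- def get_sizes_list(dim, chunks):
--     split_size = (dim + chunks - 1) // chunks
--     sizes_list = [split_size] * chunks
--     sizes_list[-1] = sizes_list[-1] - (sum(sizes_list) - dim)  # Adjust last
--     assert sum(sizes_list) == dim
--     if sizes_list[-1] < 0:
--         n_miss = sizes_list[-2] - sizes_list[-1]
--         sizes_list[-1] = sizes_list[-2]
--         for j in range(n_miss):
--             sizes_list[-j - 1] -= 1
--         assert sum(sizes_list) == dim, "Chunk sizes don't add up correctly"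
--         assert min(sizes_list) > 0, "Chunk size must be smaller or equal to dim"
--     return sizes_list
-- ===== SOURCE B (Python) =====
-- def get_sizes_list(dim, chunks):
--     q = (dim + chunks - 1) // chunks
--     r = q * chunks - dim  # total deficit; 0 <= r <= chunks-1 for chunks >= 1
--     if r <= q:
--         # put the whole deficit in the last chunk
--         return [q] * (chunks - 1) + [q - r]
--     # spread the deficit: the last r chunks get one unit less
--     return [q] * (chunks - r) + [q - 1] * r
-- ===== Notes on version B (the rewrite author's own statement) =====
-- stated objective: simpler
-- what changed: B computes the deficit r = q*chunks - dim once and builds the result directly by concatenating two replicated blocks ([q]*(chunks-1)+[q-r], or [q]*(chunks-r)+[q-1]*r when the deficit exceeds q), instead of A's build-uniform-list, mutate-last, then loop-decrementing the last n_miss entries in place with validation asserts.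
import Mathlib
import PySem

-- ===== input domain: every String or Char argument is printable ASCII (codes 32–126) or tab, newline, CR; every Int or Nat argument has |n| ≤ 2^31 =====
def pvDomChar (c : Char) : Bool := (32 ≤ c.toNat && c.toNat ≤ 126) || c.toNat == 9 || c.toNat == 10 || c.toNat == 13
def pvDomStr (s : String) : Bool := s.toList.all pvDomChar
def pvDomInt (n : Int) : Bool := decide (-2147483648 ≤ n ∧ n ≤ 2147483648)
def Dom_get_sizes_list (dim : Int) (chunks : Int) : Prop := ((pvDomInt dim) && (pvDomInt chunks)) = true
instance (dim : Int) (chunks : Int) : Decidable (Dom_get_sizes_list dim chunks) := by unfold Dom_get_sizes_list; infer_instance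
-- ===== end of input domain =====

-- B builds the chunk-sizes list directly as a concatenation of two replicated blocks
-- instead of A's build-uniform, mutate-last, then in-place decrement loop (objective: simpler).

-- ===== PORT A =====
def get_sizes_list (dim : Int) (chunks : Int) : List Int :=
  let split_size := PySem.Int.floordiv (dim + chunks - 1) chunks
  let sizes_list := List.replicate chunks.toNat split_size
  -- sizes_list[-1] = sizes_list[-1] - (sum(sizes_list) - dim)
  let sizes_list := PySem.List.pySetD sizes_list (-1)
      (PySem.List.pyGetD sizes_list (-1) 0 - (sizes_list.sum - dim))
  -- assert sum(sizes_list) == dim  (an AssertionError is outside Pre_)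
  if sizes_list.sum ≠ dim then [] else
  if PySem.List.pyGetD sizes_list (-1) 0 < 0 then
    let n_miss := PySem.List.pyGetD sizes_list (-2) 0 - PySem.List.pyGetD sizes_list (-1) 0
    let sizes_list := PySem.List.pySetD sizes_list (-1) (PySem.List.pyGetD sizes_list (-2) 0)
    let sizes_list := (PySem.List.pyRange 0 n_miss 1).foldl
      (fun l j => PySem.List.pySetD l (-j - 1) (PySem.List.pyGetD l (-j - 1) 0 - 1)) sizes_list
    -- assert sum(sizes_list) == dim ; assert min(sizes_list) > 0  (failures are outside Pre_)
    if sizes_list.sum ≠ dim then [] else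
    if ¬ (0 < (PySem.List.min? sizes_list (fun x => x)).getD 0) then [] else
    sizes_list
  else sizes_list

-- ===== PORT B =====
def get_sizes_list_alt (dim : Int) (chunks : Int) : List Int :=
  let q := PySem.Int.floordiv (dim + chunks - 1) chunks
  let r := q * chunks - dim
  if r ≤ q then
    List.replicate (chunks - 1).toNat q ++ [q - r]
  else
    List.replicate (chunks - r).toNat q ++ List.replicate r.toNat (q - 1)

-- ===== PRECONDITION & SPEC =====
-- Pre_ excludes exactly the inputs on which A raises: chunks < 1 (ZeroDivisionError or
-- IndexError on the empty list), and deficits r > q with q ≤ 1, where A's asserts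
-- (or sizes_list[-2] for chunks = 1) raise.
def Pre_get_sizes_list (dim : Int) (chunks : Int) : Prop :=
  1 ≤ chunks ∧
  (PySem.Int.floordiv (dim + chunks - 1) chunks * chunks - dim ≤ PySem.Int.floordiv (dim + chunks - 1) chunks
   ∨ 2 ≤ PySem.Int.floordiv (dim + chunks - 1) chunks)
instance (dim : Int) (chunks : Int) : Decidable (Pre_get_sizes_list dim chunks) := by
  unfold Pre_get_sizes_list; infer_instance
def pvWitness_get_sizes_list : Int × Int := (10, 3)
def Spec_get_sizes_list (dim : Int) (chunks : Int) (out : List Int) : Prop := out = get_sizes_list_alt dim chunks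
instance (dim : Int) (chunks : Int) (out : List Int) : Decidable (Spec_get_sizes_list dim chunks out) := by unfold Spec_get_sizes_list; infer_instance

-- ===== CLAIM (what is proved, stated in full; the proofs are below) =====
def Claim_equal_get_sizes_list : Prop := ∀ (dim : Int) (chunks : Int), Dom_get_sizes_list dim chunks → Pre_get_sizes_list dim chunks → Spec_get_sizes_list dim chunks (get_sizes_list dim chunks)

-- ===== LEMMAS AND PROOFS =====

-- total-form negative-index assignment, normalized to List.set
lemma pySetD_neg_nat (xs : List Int) (k : Nat) (v : Int) (h1 : 0 < k) (h2 : k ≤ xs.length) :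
    PySem.List.pySetD xs (-(k : Int)) v = xs.set (xs.length - k) v := by
  simp only [PySem.List.pySetD, PySem.List.pySet?, PySem.List.pyIdx?]
  rw [if_neg (by omega), if_pos (by omega)]
  simp only [Option.map_some, Option.getD_some]
  congr 1
  omega

-- setting the last element of a replicate
lemma set_replicate_last (n : Nat) (q v : Int) (hn : 1 ≤ n) :
    (List.replicate n q).set (n - 1) v = List.replicate (n - 1) q ++ [v] := by
  induction n with
  | zero => omega
  | succ m ih =>
    cases m with
    | zero => simp
    | succ k =>
      simp only [List.replicate_succ, List.set_cons_succ, Nat.succ_sub_one] at *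
      rw [ih (by omega)]
      simp

-- the decrement loop turns replicate n q into two blocks
lemma loop_lemma (q : Int) (n : Nat) : ∀ (k : Nat), k ≤ n →
    (PySem.List.pyRange 0 (k : Int) 1).foldl
      (fun l j => PySem.List.pySetD l (-j - 1) (PySem.List.pyGetD l (-j - 1) 0 - 1))
      (List.replicate n q)
    = List.replicate (n - k) q ++ List.replicate k (q - 1) := by
  intro k
  induction k with
  | zero => simp
  | succ m ih =>
    intro hk
    have h1 : ((m : Int) + 1) = ((m + 1 : Nat) : Int) := by push_cast; ring
    have hr : PySem.List.pyRange 0 ((m + 1 : Nat) : Int) 1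
        = PySem.List.pyRange 0 (m : Int) 1 ++ [(m : Int)] := by
      rw [← h1, PySem.List.pyRange_one_succ_right (by omega)]
    rw [hr, List.foldl_append, ih (by omega)]
    simp only [List.foldl_cons, List.foldl_nil]
    set L := List.replicate (n - m) q ++ List.replicate m (q - 1) with hL
    have hlen : L.length = n := by simp [hL]; omega
    have hget : PySem.List.pyGetD L (-(m : Int) - 1) 0 = q := by
      have : (-(m : Int) - 1) = -((m + 1 : Nat) : Int) := by push_cast; ring
      rw [this, PySem.List.pyGetD_neg_natCast L (m + 1) 0 (by omega) (by omega)]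
      simp only [hL, List.getElem_append, List.length_append, List.length_replicate]
      rw [dif_pos (by omega)]
      simp
    have hset : PySem.List.pySetD L (-(m : Int) - 1) (q - 1)
        = List.replicate (n - (m + 1)) q ++ List.replicate (m + 1) (q - 1) := by
      have : (-(m : Int) - 1) = -((m + 1 : Nat) : Int) := by push_cast; ring
      rw [this]
      have h3 : PySem.List.pySetD L (-((m + 1 : Nat) : Int)) (q - 1)
          = L.set (n - (m + 1)) (q - 1) := by
        rw [pySetD_neg_nat L (m + 1) (q - 1) (by omega) (by omega)]
        rw [hlen]
      rw [h3, hL]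
      have hsplit : n - m = (n - (m + 1)) + 1 := by omega
      rw [hsplit, List.replicate_succ' (n := n - (m+1))]
      rw [List.append_assoc, List.set_append_right _ _ (by simp)]
      simp [List.replicate_succ]
    rw [hget, hset]

lemma min_two_blocks_pos (a b : Nat) (q : Int) (hq : 2 ≤ q) (hb : 1 ≤ b) :
    0 < (PySem.List.min? (List.replicate a q ++ List.replicate b (q - 1)) (fun x => x)).getD 0 := by
  set L := List.replicate a q ++ List.replicate b (q - 1) with hL
  have hne : L ≠ [] := by
    simp [hL, List.append_eq_nil_iff, List.replicate_eq_nil_iff]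
    omega
  obtain ⟨m, hm⟩ : ∃ m, PySem.List.min? L (fun x => x) = some m := by
    cases h : PySem.List.min? L (fun x => x) with
    | none => exact absurd ((PySem.List.min?_eq_none_iff _ _).mp h) hne
    | some m => exact ⟨m, rfl⟩
  have hmem := PySem.List.min?_mem hm
  have : 0 < m := by
    simp [hL, List.mem_append, List.mem_replicate] at hmem
    rcases hmem with ⟨-, h⟩ | ⟨-, h⟩ <;> omega
  simp [hm, this]

-- ===== VERDICT (by name: the statement is the Claim_ definition above) =====
theorem get_sizes_list_spec : Claim_equal_get_sizes_list := by
  intro dim chunks _ hpre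
  obtain ⟨hc, hqr⟩ := hpre
  unfold Spec_get_sizes_list get_sizes_list get_sizes_list_alt
  set q := PySem.Int.floordiv (dim + chunks - 1) chunks with hq
  set r := q * chunks - dim with hr
  -- floor-division bounds: 0 ≤ r ≤ chunks - 1
  have hfd : q = (dim + chunks - 1) / chunks := PySem.Int.floordiv_eq_ediv_of_pos (by omega)
  have hdvd := Int.mul_ediv_add_emod (dim + chunks - 1) chunks
  have hmodlt := Int.emod_lt_of_pos (dim + chunks - 1) (show (0:Int) < chunks by omega)
  have hmodge := Int.emod_nonneg (dim + chunks - 1) (show (chunks:Int) ≠ 0 by omega)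
  have hqc : q * chunks = chunks * ((dim + chunks - 1) / chunks) := by rw [hfd]; ring
  have hr0 : 0 ≤ r := by rw [hr]; omega
  have hrc : r ≤ chunks - 1 := by rw [hr]; omega
  have hn : chunks.toNat ≥ 1 := by omega
  set n := chunks.toNat with hnn
  have hcn : (n : Int) = chunks := by omega
  -- the first mutation: replicate n q with last set to q - r
  have hsum0 : (List.replicate n q).sum = q * chunks := by
    simp [List.sum_replicate, hcn.symm]; ring
  have hlast0 : PySem.List.pyGetD (List.replicate n q) (-1) 0 = q := by
    rw [PySem.List.pyGetD_neg_ofNat (List.replicate n q) 1 0 (by omega) (by simp; omega)]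
    simp
  have hset0 : PySem.List.pySetD (List.replicate n q) (-1)
      (PySem.List.pyGetD (List.replicate n q) (-1) 0 - ((List.replicate n q).sum - dim))
      = List.replicate (n - 1) q ++ [q - r] := by
    rw [hlast0, hsum0]
    have hm1 : (-1 : Int) = -((1 : Nat) : Int) := by norm_num
    rw [hm1, pySetD_neg_nat _ 1 _ (by omega) (by simp; omega)]
    simp only [List.length_replicate]
    rw [set_replicate_last n _ _ hn, ← hr]
  simp only [hset0]
  set L1 := List.replicate (n - 1) q ++ [q - r] with hL1
  have hsum1 : L1.sum = dim := by
    simp [hL1, List.sum_replicate]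
    have : ((n - 1 : Nat) : Int) = chunks - 1 := by omega
    rw [this, hr]; ring
  have hlast1 : PySem.List.pyGetD L1 (-1) 0 = q - r := by
    rw [hL1, PySem.List.pyGetD_neg_one_append_singleton]
  rw [if_neg (by rw [hsum1]; simp)]
  by_cases hcase : r ≤ q
  · -- last chunk nonnegative: no redistribution
    rw [if_neg (by rw [hlast1]; omega), if_pos hcase, hL1]
    congr 2
    omega
  · -- redistribution branch: q ≥ 2, r > q
    have hq2 : 2 ≤ q := by tauto
    have hrq : q < r := by omega
    have hn4 : 4 ≤ n := by omega   -- r ≥ 3, chunks ≥ r + 1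
    rw [if_pos (by rw [hlast1]; omega)]
    have hlen1 : L1.length = n := by simp [hL1]; omega
    have hget2 : PySem.List.pyGetD L1 (-2) 0 = q := by
      rw [PySem.List.pyGetD_neg_ofNat L1 2 0 (by omega) (by omega)]
      simp only [hL1, List.getElem_append, List.length_append, List.length_replicate,
        List.length_cons, List.length_nil]
      rw [dif_pos (by omega)]
      simp
    have hset1 : PySem.List.pySetD L1 (-1) (PySem.List.pyGetD L1 (-2) 0)
        = List.replicate n q := by
      rw [hget2]
      have hm1 : (-1 : Int) = -((1 : Nat) : Int) := by norm_num
      rw [hm1, pySetD_neg_nat L1 1 q (by omega) (by omega)]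
      have hrep : List.replicate n q = List.replicate (n - 1) q ++ [q] := by
        rw [← List.replicate_succ']; congr 1; omega
      rw [hrep, hlen1, hL1]
      rw [List.set_append_right _ _ (by simp)]
      simp
    rw [hset1, hlast1, hget2]
    have hmiss : q - (q - r) = ((r.toNat : Nat) : Int) := by omega
    rw [hmiss, loop_lemma q n r.toNat (by omega)]
    set L2 := List.replicate (n - r.toNat) q ++ List.replicate r.toNat (q - 1) with hL2
    have hsum2 : L2.sum = dim := by
      have h1 : ((n - r.toNat : Nat) : Int) = chunks - r := by omega
      have h2 : ((r.toNat : Nat) : Int) = r := by omega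
      simp only [hL2, List.sum_append, List.sum_replicate, nsmul_eq_mul]
      rw [h1, h2, hr]; ring
    rw [if_neg (by rw [hsum2]; simp)]
    rw [if_neg (by simp only [not_not]; exact min_two_blocks_pos _ _ q hq2 (by omega))]
    rw [if_neg (by omega), hL2]
    congr 2
    omega
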